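-- pv_equiv track=rewrite | github.com/dew1107/team329 | archive/rocov2/code_329/global_train/global_kd/orchestrator.py | _build_fusion_kd_edges
-- ===== SOURCE A (Python) =====
-- def _build_fusion_kd_edges(high, low, metrics, k_per_student=2):
--     high_sorted = sorted(high, key=lambda c: metrics.get(c, float("-inf")), reverse=True)
--     edges = []
--     for s in low:
--         teachers = high_sorted[:k_per_student] if len(high_sorted) >= k_per_student else high_sorted
--         for t in teachers:
--             edges.append((t, s))
--     return edges
-- ===== SOURCE B (Python) =====
-- def _build_fusion_kd_edges(high, low, metrics, k_per_student=2):
--     # Partial selection: extract the top teachers one by one by repeated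
--     # max-extraction instead of fully sorting the teacher list.
--     pool = list(high)
--     teachers = []
--     while pool and len(teachers) < k_per_student:
--         best = max(pool, key=lambda c: metrics.get(c, float("-inf")))
--         teachers.append(best)
--         pool.remove(best)
--     return [(t, s) for s in low for t in teachers]
-- ===== Notes on version B (the rewrite author's own statement) =====
-- stated objective: alternative
-- what changed: B replaces the full descending sort of the teacher list by repeated first-max extraction of just the top k_per_student teachers, and builds the edges with a flat comprehension instead of nested appends.
-- intended difference: For negative k_per_student (with teachers and students present), A's slice high_sorted[:k] accidentally pairs every student with all but the last |k| sorted teachers, while B selects no teachers and returns no edges, the intended top-k meaning for a non-positive k. — e.g. on _build_fusion_kd_edges(["a", "b"], ["s"], [], -1): A returns [("a", "s")], B returns []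
import Mathlib
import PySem

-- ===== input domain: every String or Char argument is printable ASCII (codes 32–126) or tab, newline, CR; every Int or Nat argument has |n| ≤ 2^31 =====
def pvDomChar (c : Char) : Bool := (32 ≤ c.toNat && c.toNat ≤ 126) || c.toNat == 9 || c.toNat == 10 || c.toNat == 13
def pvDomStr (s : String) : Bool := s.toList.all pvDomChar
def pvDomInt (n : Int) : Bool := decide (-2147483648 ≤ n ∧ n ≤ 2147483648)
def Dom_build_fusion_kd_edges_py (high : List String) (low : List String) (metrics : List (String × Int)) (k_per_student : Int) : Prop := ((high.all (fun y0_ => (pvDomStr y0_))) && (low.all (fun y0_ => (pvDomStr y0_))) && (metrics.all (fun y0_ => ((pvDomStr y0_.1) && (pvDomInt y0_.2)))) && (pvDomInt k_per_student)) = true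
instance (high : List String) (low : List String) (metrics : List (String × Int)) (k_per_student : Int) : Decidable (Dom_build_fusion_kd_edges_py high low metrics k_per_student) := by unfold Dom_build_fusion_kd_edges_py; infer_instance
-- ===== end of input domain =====

-- B selects the top teachers by repeated first-max extraction instead of a full sort; alternative
-- algorithm, same value outside D_ (B intentionally returns no edges for negative k_per_student).

-- Shared sort key of both Pythons: metrics.get(c, float("-inf")).
-- float("-inf") is ported as a sentinel strictly below every metric value admitted by Dom (|v| ≤ 2^31),
-- so every key comparison is exactly Python's on the stated domain.
def kdKey (metrics : List (String × Int)) (c : String) : Int :=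
  PySem.Dict.getD (PySem.Dict.mk metrics) c (-8589934592)

-- ===== PORT A =====
def build_fusion_kd_edges_py (high : List String) (low : List String) (metrics : List (String × Int)) (k_per_student : Int) : List (String × String) :=
  let high_sorted := PySem.List.sorted high (kdKey metrics) true
  low.foldl (fun edges s =>
    let teachers :=
      if (high_sorted.length : Int) ≥ k_per_student then
        PySem.List.slice high_sorted none (some k_per_student)
      else high_sorted
    teachers.foldl (fun e t => e ++ [(t, s)]) edges) []

-- ===== PORT B =====
-- the "while pool and len(teachers) < k_per_student: best = max(pool, key=…); …; pool.remove(best)"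
-- loop of Source B; fuel = pool length (pool shrinks by one each iteration)
def pvSelectTop (metrics : List (String × Int)) (k : Int) : Nat → List String → Int → List String
  | 0, _, _ => []
  | fuel + 1, pool, cnt =>
    if pool ≠ [] ∧ cnt < k then
      match PySem.List.max? pool (kdKey metrics) with
      | none => []          -- unreachable: pool is nonempty
      | some best =>
        match PySem.List.remove? pool best with
        | none => []        -- unreachable: best ∈ pool
        | some rest => best :: pvSelectTop metrics k fuel rest (cnt + 1)
    else []

def build_fusion_kd_edges_py_alt (high : List String) (low : List String) (metrics : List (String × Int)) (k_per_student : Int) : List (String × String) :=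
  let teachers := pvSelectTop metrics k_per_student high.length high 0
  low.flatMap (fun s => teachers.map (fun tc => (tc, s)))

-- ===== PRECONDITION & SPEC =====
-- For negative k_per_student (with teachers and students left after the slice), A's slice
-- high_sorted[:k] accidentally pairs every student with all but the last |k| sorted teachers,
-- while B selects no teachers and returns no edges, the intended top-k meaning for non-positive k.
def D_build_fusion_kd_edges_py (high : List String) (low : List String) (metrics : List (String × Int)) (k_per_student : Int) : Prop :=
  k_per_student < 0 ∧ low ≠ [] ∧ 0 < (high.length : Int) + k_per_student
instance (high : List String) (low : List String) (metrics : List (String × Int)) (k_per_student : Int) : Decidable (D_build_fusion_kd_edges_py high low metrics k_per_student) := by unfold D_build_fusion_kd_edges_py; infer_instance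

def Spec_build_fusion_kd_edges_py (high : List String) (low : List String) (metrics : List (String × Int)) (k_per_student : Int) (out : List (String × String)) : Prop := ¬ D_build_fusion_kd_edges_py high low metrics k_per_student → out = build_fusion_kd_edges_py_alt high low metrics k_per_student
instance (high : List String) (low : List String) (metrics : List (String × Int)) (k_per_student : Int) (out : List (String × String)) : Decidable (Spec_build_fusion_kd_edges_py high low metrics k_per_student out) := by unfold Spec_build_fusion_kd_edges_py; infer_instance

def pvDiffWitness_build_fusion_kd_edges_py : List String × List String × (List (String × Int)) × Int := (["a", "b"], ["s"], [], -1)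
def pvDiffWitnessOut_build_fusion_kd_edges_py : (List (String × String)) × (List (String × String)) := ([("a", "s")], [])

-- ===== CLAIM (what is proved, stated in full; the proofs are below) =====
def Claim_unchanged_build_fusion_kd_edges_py : Prop := ∀ (high : List String) (low : List String) (metrics : List (String × Int)) (k_per_student : Int), Dom_build_fusion_kd_edges_py high low metrics k_per_student → Spec_build_fusion_kd_edges_py high low metrics k_per_student (build_fusion_kd_edges_py high low metrics k_per_student)
def Claim_changed_build_fusion_kd_edges_py : Prop := Dom_build_fusion_kd_edges_py (pvDiffWitness_build_fusion_kd_edges_py.1) (pvDiffWitness_build_fusion_kd_edges_py.2.1) (pvDiffWitness_build_fusion_kd_edges_py.2.2.1) (pvDiffWitness_build_fusion_kd_edges_py.2.2.2) ∧ D_build_fusion_kd_edges_py (pvDiffWitness_build_fusion_kd_edges_py.1) (pvDiffWitness_build_fusion_kd_edges_py.2.1) (pvDiffWitness_build_fusion_kd_edges_py.2.2.1) (pvDiffWitness_build_fusion_kd_edges_py.2.2.2) ∧ build_fusion_kd_edges_py (pvDiffWitness_build_fusion_kd_edges_py.1) (pvDiffWitness_build_fusion_kd_edges_py.2.1) (pvDiffWitness_build_fusion_kd_edges_py.2.2.1)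 (pvDiffWitness_build_fusion_kd_edges_py.2.2.2) = pvDiffWitnessOut_build_fusion_kd_edges_py.1 ∧ build_fusion_kd_edges_py_alt (pvDiffWitness_build_fusion_kd_edges_py.1) (pvDiffWitness_build_fusion_kd_edges_py.2.1) (pvDiffWitness_build_fusion_kd_edges_py.2.2.1) (pvDiffWitness_build_fusion_kd_edges_py.2.2.2) = pvDiffWitnessOut_build_fusion_kd_edges_py.2 ∧ pvDiffWitnessOut_build_fusion_kd_edges_py.1 ≠ pvDiffWitnessOut_build_fusion_kd_edges_py.2
def Claim_exact_build_fusion_kd_edges_py : Prop := ∀ (high : List String) (low : List String) (metrics : List (String × Int)) (k_per_student : Int), Dom_build_fusion_kd_edges_py high low metrics k_per_student → D_build_fusion_kd_edges_py high low metrics k_per_student → build_fusion_kd_edges_py high low metrics k_per_student ≠ build_fusion_kd_edges_py_alt high low metrics k_per_student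

-- ===== LEMMAS AND PROOFS =====

-- inserting with the strict rule commutes with inserting with the tie-keeping rule
theorem kd_insert_comm (K : String → Int) (x y : String) (acc : List String) :
    PySem.List.insertBy (fun a b => decide (K b < K a)) y
      (PySem.List.insertBy (fun a b => decide (K b ≤ K a)) x acc)
    = PySem.List.insertBy (fun a b => decide (K b ≤ K a)) x
        (PySem.List.insertBy (fun a b => decide (K b < K a)) y acc) := by
  induction acc with
  | nil =>
    by_cases h1 : K x < K y <;>
      simp [PySem.List.insertBy, h1, show (K y ≤ K x) ↔ ¬ (K x < K y) by omega]
  | cons a t ih =>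
    by_cases hxa : K a ≤ K x <;> by_cases hya : K a < K y <;> by_cases hxy : K x < K y <;>
      simp [PySem.List.insertBy, hxa, hya, hxy, ih,
        show (K y ≤ K x) ↔ ¬ (K x < K y) by omega] <;> omega

-- the stable reverse sort of (x :: xs): insert x with the tie-keeping rule into the sorted tail
theorem kd_sorted_cons (K : String → Int) (x : String) (xs : List String) :
    PySem.List.sorted (x :: xs) K true
    = PySem.List.insertBy (fun a b => decide (K b ≤ K a)) x (PySem.List.sorted xs K true) := by
  have G : ∀ (l : List String) (acc : List String) (z : String),
      l.foldl (fun acc x => PySem.List.insertBy (fun a b => decide (K b < K a)) x acc)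
        (PySem.List.insertBy (fun a b => decide (K b ≤ K a)) z acc)
      = PySem.List.insertBy (fun a b => decide (K b ≤ K a)) z
          (l.foldl (fun acc x => PySem.List.insertBy (fun a b => decide (K b < K a)) x acc) acc) := by
    intro l
    induction l with
    | nil => intro acc z; rfl
    | cons y t ih =>
      intro acc z
      simp only [List.foldl_cons]
      rw [kd_insert_comm, ih]
  rw [PySem.List.sorted_rev_eq_foldl_insertBy, PySem.List.sorted_rev_eq_foldl_insertBy]
  simp only [List.foldl_cons]
  have hx : PySem.List.insertBy (fun a b => decide (K b < K a)) x []
      = PySem.List.insertBy (fun a b => decide (K b ≤ K a)) x [] := rfl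
  rw [hx, G]

-- Python's max(…, key=…) over a cons, as the plain first-max fold
theorem kd_max?_cons (K : String → Int) :
    ∀ (l : List String) (x : String),
      PySem.List.max? (x :: l) K = some (l.foldl (fun m y => if K m < K y then y else m) x) := by
  intro l
  induction l with
  | nil => intro x; rfl
  | cons y t ih =>
    intro x
    have hstep : PySem.List.max? (x :: y :: t) K
        = PySem.List.max? ((if K x < K y then y else x) :: t) K := by
      by_cases h : K x < K y <;> simp [PySem.List.max?, h]
    rw [hstep, ih]
    simp [List.foldl_cons]

theorem kd_maxfold_dominating (K : String → Int) (l : List String) (a : String)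
    (h : ∀ y ∈ l, K y ≤ K a) :
    l.foldl (fun m y => if K m < K y then y else m) a = a := by
  induction l with
  | nil => rfl
  | cons y t ih =>
    simp only [List.foldl_cons]
    have hy : ¬ K a < K y := by have := h y (by simp); omega
    rw [if_neg hy]
    exact ih (fun z hz => h z (by simp [hz]))

theorem kd_maxfold_dominated (K : String → Int) (l : List String) :
    ∀ (a b : String), (∃ y ∈ l, K a < K y) → (∃ y ∈ l, K b < K y) →
      l.foldl (fun m y => if K m < K y then y else m) a
      = l.foldl (fun m y => if K m < K y then y else m) b := by
  induction l with
  | nil => intro a b ha _; simp at ha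
  | cons y t ih =>
    intro a b ha hb
    simp only [List.foldl_cons]
    by_cases h1 : K a < K y <;> by_cases h2 : K b < K y
    · rw [if_pos h1, if_pos h2]
    · rw [if_pos h1, if_neg h2]
      obtain ⟨w, hw, hbw⟩ := hb
      rcases List.mem_cons.mp hw with hw | hw
      · exact absurd (hw ▸ hbw) h2
      · exact ih y b ⟨w, hw, by omega⟩ ⟨w, hw, hbw⟩
    · rw [if_neg h1, if_pos h2]
      obtain ⟨w, hw, haw⟩ := ha
      rcases List.mem_cons.mp hw with hw | hw
      · exact absurd (hw ▸ haw) h1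
      · exact ih a y ⟨w, hw, haw⟩ ⟨w, hw, by omega⟩
    · rw [if_neg h1, if_neg h2]
      obtain ⟨w, hw, haw⟩ := ha
      rcases List.mem_cons.mp hw with hw | hw
      · exact absurd (hw ▸ haw) h1
      · obtain ⟨w', hw', hbw'⟩ := hb
        rcases List.mem_cons.mp hw' with hw' | hw'
        · exact absurd (hw' ▸ hbw') h2
        · exact ih a b ⟨w, hw, haw⟩ ⟨w', hw', hbw'⟩

theorem kd_remove?_cons_of_ne (x v : String) (l r : List String) (hne : x ≠ v)
    (h : PySem.List.remove? l v = some r) :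
    PySem.List.remove? (x :: l) v = some (x :: r) := by
  simp only [PySem.List.remove?] at h ⊢
  rw [List.idxOf?_cons]
  have hbeq : (x == v) = false := by simp [hne]
  rw [if_neg (by simp [hbeq])]
  cases hidx : List.idxOf? v l with
  | none => rw [hidx] at h; simp at h
  | some i =>
    rw [hidx] at h
    simp only [Option.map_some] at h ⊢
    rw [Option.some_inj] at h ⊢
    rw [List.eraseIdx_cons_succ, h]

-- THE STEP: a stable reverse sort starts with the first maximum, and its tail is the sort of the list with that occurrence removed
theorem kd_step (K : String → Int) :
    ∀ (xs : List String) (m : String), PySem.List.max? xs K = some m →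
      ∃ r, PySem.List.remove? xs m = some r ∧
        PySem.List.sorted xs K true = m :: PySem.List.sorted r K true := by
  intro xs
  induction xs with
  | nil => intro m hm; simp [PySem.List.max?] at hm
  | cons x l ih =>
    intro m hm
    rw [kd_max?_cons, Option.some_inj] at hm
    by_cases hdom : ∀ y ∈ l, K y ≤ K x
    · -- x itself is the first maximum
      have hmx : m = x := by rw [kd_maxfold_dominating K l x hdom] at hm; exact hm.symm
      subst hmx
      refine ⟨l, ?_, ?_⟩
      · simp [PySem.List.remove?, List.idxOf?_cons]
      · rw [kd_sorted_cons]
        cases hs : PySem.List.sorted l K true with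
        | nil => rfl
        | cons h t' =>
          have hh : h ∈ l := by
            have : h ∈ PySem.List.sorted l K true := by rw [hs]; simp
            rwa [PySem.List.mem_sorted] at this
          simp [PySem.List.insertBy, hdom h hh]
    · -- some element of l strictly beats x: the first maximum of x :: l is the first maximum of l
      simp only [not_forall, not_le] at hdom
      obtain ⟨w, hwl, hw⟩ := hdom
      cases l with
      | nil => simp at hwl
      | cons h t =>
        have hm' := kd_max?_cons K t h
        have hmm' : m = t.foldl (fun m y => if K m < K y then y else m) h := by
          simp only [List.foldl_cons] at hm
          by_cases hxh : K x < K h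
          · rw [if_pos hxh] at hm; exact hm.symm
          · rw [if_neg hxh] at hm
            have hwt : w ∈ t := by
              rcases List.mem_cons.mp hwl with h' | h'
              · exact absurd (h' ▸ hw) hxh
              · exact h'
            rw [kd_maxfold_dominated K t x h ⟨w, hwt, hw⟩ ⟨w, hwt, by omega⟩] at hm
            exact hm.symm
        have hmax' : PySem.List.max? (h :: t) K = some m := by rw [hm', hmm']
        have hxm : K x < K m := by
          have := PySem.List.max?_isMax hmax' w hwl
          omega
        obtain ⟨r', hrem, hsort⟩ := ih m hmax'
        have hne : x ≠ m := fun e => by rw [e] at hxm; omega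
        refine ⟨x :: r', kd_remove?_cons_of_ne x m _ _ hne hrem, ?_⟩
        rw [kd_sorted_cons, hsort]
        have : PySem.List.insertBy (fun a b => decide (K b ≤ K a)) x
            (m :: PySem.List.sorted r' K true)
            = m :: PySem.List.insertBy (fun a b => decide (K b ≤ K a)) x
                (PySem.List.sorted r' K true) := by
          simp [PySem.List.insertBy, show ¬ (K m ≤ K x) by omega]
        rw [this, ← kd_sorted_cons]

-- B's while loop produces exactly the ((k - cnt).toNat)-prefix of A's sorted list
theorem kd_select_eq_take (metrics : List (String × Int)) (k : Int) :
    ∀ (fuel : Nat) (pool : List String) (cnt : Int), pool.length ≤ fuel →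
      pvSelectTop metrics k fuel pool cnt
      = (PySem.List.sorted pool (kdKey metrics) true).take (k - cnt).toNat := by
  intro fuel
  induction fuel with
  | zero =>
    intro pool cnt hle
    have : pool = [] := List.eq_nil_of_length_eq_zero (Nat.le_zero.mp hle)
    subst this
    simp [pvSelectTop, PySem.List.sorted]
  | succ fuel ih =>
    intro pool cnt hle
    by_cases hp : pool = []
    · subst hp; simp [pvSelectTop, PySem.List.sorted]
    · by_cases hc : cnt < k
      · cases hmax : PySem.List.max? pool (kdKey metrics) with
        | none => exact absurd ((PySem.List.max?_eq_none_iff pool (kdKey metrics)).mp hmax) hp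
        | some m =>
          obtain ⟨r, hrem, hsort⟩ := kd_step (kdKey metrics) pool m hmax
          have hmem : m ∈ pool := PySem.List.max?_mem hmax
          have hr : r = pool.erase m := by
            have := PySem.List.remove?_eq_some_erase pool m hmem
            rw [hrem] at this; exact Option.some_inj.mp this
          have hrlen : r.length ≤ fuel := by
            rw [hr, List.length_erase, if_pos (by simpa using hmem)]
            omega
          rw [hsort]
          simp only [pvSelectTop, hmax, hrem]
          rw [if_pos (show pool ≠ [] ∧ cnt < k from ⟨hp, hc⟩)]
          rw [ih r (cnt + 1) hrlen]
          have : (k - cnt).toNat = (k - (cnt + 1)).toNat + 1 := by omega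
          rw [this, List.take_succ_cons]
      · simp only [pvSelectTop]
        rw [if_neg (show ¬ (pool ≠ [] ∧ cnt < k) from fun h => hc h.2)]
        have : (k - cnt).toNat = 0 := by omega
        rw [this, List.take_zero]

-- A's teacher list (guard + slice on the sorted list) is a take on the sorted list
theorem kd_teachers_eq (metrics : List (String × Int)) (high : List String) (k : Int) :
    (if ((PySem.List.sorted high (kdKey metrics) true).length : Int) ≥ k then
        PySem.List.slice (PySem.List.sorted high (kdKey metrics) true) none (some k)
      else PySem.List.sorted high (kdKey metrics) true)
    = (PySem.List.sorted high (kdKey metrics) true).take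
        (if 0 ≤ k then (min k (high.length : Int)).toNat else ((high.length : Int) + k).toNat) := by
  set hs := PySem.List.sorted high (kdKey metrics) true with hhs
  have hlen : hs.length = high.length := by rw [hhs]; exact PySem.List.length_sorted high (kdKey metrics) true
  by_cases hk : 0 ≤ k
  · rw [if_pos hk]
    by_cases hkn : k ≤ (hs.length : Int)
    · rw [if_pos hkn]
      have hcast : k = ((k.toNat : Nat) : Int) := (Int.toNat_of_nonneg hk).symm
      rw [hcast, PySem.List.slice_to_natCast]
      congr 1
      omega
    · rw [if_neg hkn]
      have : (min k (high.length : Int)).toNat = hs.length := by omega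
      rw [this, List.take_length]
  · rw [if_neg hk, if_pos (by omega)]
    have hj : 0 < (-k).toNat := by omega
    have hcast : k = -(((-k).toNat : Nat) : Int) := by omega
    rw [hcast, PySem.List.slice_to_neg_natCast hs ((-k).toNat) hj]
    congr 1
    omega

-- taking min m (length) is taking m
theorem kd_take_min_len {α : Type} (l : List α) (m : Nat) : l.take (min m l.length) = l.take m := by
  rcases Nat.le_total m l.length with h | h
  · rw [Nat.min_eq_left h]
  · rw [Nat.min_eq_right h, List.take_length, List.take_of_length_le h]

-- A's nested foldl as a flatMap over a fixed teacher list
theorem kd_A_eq_flatMap (low : List String) (teachers : List String) :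
    low.foldl (fun edges s => teachers.foldl (fun e t => e ++ [(t, s)]) edges) []
    = low.flatMap (fun s => teachers.map (fun t => (t, s))) := by
  have hinner : ∀ (edges : List (String × String)) (s : String),
      teachers.foldl (fun e t => e ++ [(t, s)]) edges
      = edges ++ teachers.map (fun t => (t, s)) :=
    fun edges s => PySem.List.foldl_append_singleton_eq_map (fun t => (t, s)) teachers edges
  calc low.foldl (fun edges s => teachers.foldl (fun e t => e ++ [(t, s)]) edges) []
      = low.foldl (fun edges s => edges ++ teachers.map (fun t => (t, s))) [] := by
        exact PySem.List.foldl_congr_mem low _ _ [] (fun acc s _ => hinner acc s)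
    _ = low.flatMap (fun s => teachers.map (fun t => (t, s))) := by
        rw [PySem.List.foldl_append_eq_flatMap]; rfl

-- ===== VERDICT (by name: the statements are the Claim_ definitions above) =====
theorem build_fusion_kd_edges_py_spec : Claim_unchanged_build_fusion_kd_edges_py := by
  intro high low metrics k _ hD
  unfold build_fusion_kd_edges_py build_fusion_kd_edges_py_alt
  simp only []
  rw [kd_select_eq_take metrics k high.length high 0 le_rfl, kd_A_eq_flatMap]
  rw [kd_teachers_eq metrics high k]
  by_cases hk : 0 ≤ k
  · rw [if_pos hk]
    have : (min k (high.length : Int)).toNat = min k.toNat high.length := by omega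
    rw [this, ← PySem.List.length_sorted high (kdKey metrics) true, kd_take_min_len]
    norm_num
  · rw [if_neg hk]
    unfold D_build_fusion_kd_edges_py at hD
    push_neg at hD
    rcases eq_or_ne low [] with hl | hl
    · subst hl; rfl
    · have hn : (high.length : Int) + k ≤ 0 := hD (by omega) hl
      have h1 : ((high.length : Int) + k).toNat = 0 := by omega
      have h2 : (k - 0).toNat = 0 := by omega
      rw [h1, h2]

theorem build_fusion_kd_edges_py_changed : Claim_changed_build_fusion_kd_edges_py := by
  unfold Claim_changed_build_fusion_kd_edges_py; decide

theorem build_fusion_kd_edges_py_tight : Claim_exact_build_fusion_kd_edges_py := by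
  intro high low metrics k _ hD
  obtain ⟨hk, hlow, hn⟩ := hD
  unfold build_fusion_kd_edges_py build_fusion_kd_edges_py_alt
  simp only []
  rw [kd_select_eq_take metrics k high.length high 0 le_rfl, kd_A_eq_flatMap]
  rw [kd_teachers_eq metrics high k, if_neg (by omega)]
  have h2 : (k - 0).toNat = 0 := by omega
  rw [h2, List.take_zero]
  cases low with
  | nil => exact absurd rfl hlow
  | cons s rest =>
    simp only [List.flatMap_cons, List.map_nil]
    intro hcontra
    have hne : (PySem.List.sorted high (kdKey metrics) true).take ((high.length : Int) + k).toNat ≠ [] := by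
      rw [ne_eq, List.take_eq_nil_iff]
      push_neg
      constructor
      · omega
      · rw [ne_eq, PySem.List.sorted_eq_nil_iff]
        intro h; rw [h] at hn; simp at hn; omega
    have hflat : List.flatMap (fun _ : String => ([] : List (String × String))) rest = [] := by
      induction rest with
      | nil => rfl
      | cons _ _ ih => simpa using ih
    cases htk : (PySem.List.sorted high (kdKey metrics) true).take ((high.length : Int) + k).toNat with
    | nil => exact hne htk
    | cons a t => rw [htk, hflat] at hcontra; simp at hcontra
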